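-- pv_equiv track=rewrite | github.com/mmaryushkin/Bot-calculator | Bot_functions.py | upgrade_expression
-- ===== SOURCE A (Python) =====
-- def upgrade_expression(s: str):
--     """ преобразование строки математического выражение без пробелов
--     возвращает массив, элементы которого числа и операции примера """
--
--     expression = ''
--     num = '0123456789.'
--     operations = '+-/*^()'
--
--     for e in s:
--
--         if e in num:  # цифры
--             expression += e
--
--         elif e in operations:  # знаки с пробелами
--             expression += ' ' + e + ' '
--
--     return expression.split()
-- ===== SOURCE B (Python) =====
-- def upgrade_expression(s: str):
--     """Single-pass tokenizer: keep a digit buffer, emit tokens directly."""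
--     tokens = []
--     buf = []
--     for ch in s:
--         if ch in '0123456789.':
--             buf.append(ch)
--         elif ch in '+-/*^()':
--             if buf:
--                 tokens.append(''.join(buf))
--                 buf = []
--             tokens.append(ch)
--         # any other character is skipped without flushing the buffer
--     if buf:
--         tokens.append(''.join(buf))
--     return tokens
-- ===== Notes on version B (the rewrite author's own statement) =====
-- stated objective: simpler
-- what changed: Replaces build-a-spaced-string-then-str.split with a direct one-pass tokenizer that maintains a current-number buffer and emits tokens immediately.
import Mathlib
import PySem

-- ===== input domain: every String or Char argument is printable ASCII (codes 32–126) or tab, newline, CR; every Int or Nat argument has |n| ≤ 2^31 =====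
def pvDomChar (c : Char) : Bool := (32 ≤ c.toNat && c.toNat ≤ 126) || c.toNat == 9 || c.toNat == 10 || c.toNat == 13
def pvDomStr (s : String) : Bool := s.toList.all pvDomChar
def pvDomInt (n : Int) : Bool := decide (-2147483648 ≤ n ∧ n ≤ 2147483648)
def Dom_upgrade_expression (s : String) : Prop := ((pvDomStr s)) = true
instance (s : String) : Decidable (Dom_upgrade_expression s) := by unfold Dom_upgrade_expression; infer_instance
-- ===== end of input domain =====

-- B replaces A's build-a-spaced-string-then-split() with a direct one-pass tokenizer (simpler decomposition, same O(n) cost).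


-- ===== PORT A =====
-- builds 'expression' (digits kept, operators wrapped in spaces, rest dropped), then str.split()
def upgrade_expression (s : String) : List String :=
  let expression : List Char := s.toList.foldl
    (fun e c =>
      if c ∈ "0123456789.".toList then e ++ [c]
      else if c ∈ "+-/*^()".toList then e ++ [' ', c, ' ']
      else e) []
  PySem.Str.split₀ (String.ofList expression)

-- ===== PORT B =====
-- one-pass tokenizer: digit buffer `buf`, tokens emitted in order (B's loop as structural recursion on the chars)
def tokB (buf : List Char) : List Char → List (List Char)
  | [] => if buf.isEmpty then [] else [buf]
  | c :: cs =>
    if c ∈ "0123456789.".toList then tokB (buf ++ [c]) cs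
    else if c ∈ "+-/*^()".toList then
      (if buf.isEmpty then [c] :: tokB [] cs else buf :: [c] :: tokB [] cs)
    else tokB buf cs

def upgrade_expression_alt (s : String) : List String :=
  (tokB [] s.toList).map String.ofList

-- ===== PRECONDITION & SPEC =====
def Spec_upgrade_expression (s : String) (out : List String) : Prop := out = upgrade_expression_alt s
instance (s : String) (out : List String) : Decidable (Spec_upgrade_expression s out) := by unfold Spec_upgrade_expression; infer_instance

-- ===== CLAIM (what is proved, stated in full; the proofs are below) =====
def Claim_equal_upgrade_expression : Prop := ∀ (s : String), Dom_upgrade_expression s → Spec_upgrade_expression s (upgrade_expression s)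

-- ===== LEMMAS AND PROOFS =====

-- A's per-character contribution to `expression`
def pieceA (c : Char) : List Char :=
  if c ∈ "0123456789.".toList then [c]
  else if c ∈ "+-/*^()".toList then [' ', c, ' ']
  else []

theorem nospace_num {c : Char} (hc : c ∈ "0123456789.".toList) :
    PySem.Chars.isspace c = false := by
  have h := List.all_eq_true.mp
    (by decide : ("0123456789.".toList.all fun c => !(PySem.Chars.isspace c)) = true) c hc
  simpa using h

theorem ops_facts {c : Char} (hc : c ∈ "+-/*^()".toList) :
    PySem.Chars.isspace c = false ∧ c ∉ "0123456789.".toList := by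
  have h := List.all_eq_true.mp
    (by decide : ("+-/*^()".toList.all fun c =>
        (!(PySem.Chars.isspace c)) && !(decide (c ∈ "0123456789.".toList))) = true) c hc
  simp only [Bool.and_eq_true, Bool.not_eq_true', decide_eq_false_iff_not] at h
  exact h

-- main invariant: A's whitespace-split of the remaining spaced string equals B's tokenizer run
theorem go_eq_tokB (cs : List Char) : ∀ (cur : List Char) (acc : List (List Char)),
    (∀ c ∈ cur, PySem.Chars.isspace c = false) →
    PySem.Chars.split₀.go (cs.flatMap pieceA) cur acc = acc.reverse ++ tokB cur.reverse cs := by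
  induction cs with
  | nil =>
    intro cur acc _
    cases cur <;> simp [PySem.Chars.split₀.go, tokB]
  | cons c cs ih =>
    intro cur acc hcur
    by_cases hn : c ∈ "0123456789.".toList
    · have hs := nospace_num hn
      have hp : pieceA c = [c] := by unfold pieceA; rw [if_pos hn]
      rw [List.flatMap_cons, hp, List.singleton_append]
      simp only [PySem.Chars.split₀.go, hs, Bool.false_eq_true, if_false]
      rw [ih (c :: cur) acc (by
        intro x hx
        rcases List.mem_cons.mp hx with rfl | hx
        · exact hs
        · exact hcur x hx)]
      simp only [tokB, List.reverse_cons]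
      rw [if_pos hn]
    · by_cases ho : c ∈ "+-/*^()".toList
      · obtain ⟨hs, hnum⟩ := ops_facts ho
        have h1 : PySem.Chars.isspace ' ' = true := by decide
        have hp : pieceA c = [' ', c, ' '] := by unfold pieceA; rw [if_neg hn, if_pos ho]
        rw [List.flatMap_cons, hp]
        by_cases hcurE : cur = []
        · subst hcurE
          simp only [List.nil_append, List.cons_append, PySem.Chars.split₀.go, h1, hs,
            Bool.false_eq_true, if_false, if_true, List.isEmpty_nil, List.isEmpty_cons,
            List.reverse_singleton]
          rw [ih [] ([c] :: acc) (by intro x hx; simp at hx)]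
          simp only [tokB, List.reverse_nil]
          rw [if_neg hnum, if_pos ho]
          simp
        · have hne : cur.isEmpty = false := by simpa [List.isEmpty_iff] using hcurE
          simp only [List.nil_append, List.cons_append, PySem.Chars.split₀.go, h1, hs, hne,
            Bool.false_eq_true, if_false, if_true, List.isEmpty_cons, List.reverse_singleton]
          rw [ih [] ([c] :: cur.reverse :: acc) (by intro x hx; simp at hx)]
          simp only [tokB, List.reverse_nil]
          rw [if_neg hnum, if_pos ho]
          have hne2 : cur.reverse.isEmpty = false := by
            simpa [List.isEmpty_iff] using hcurE
          simp [hne2]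
      · have hp : pieceA c = [] := by unfold pieceA; rw [if_neg hn, if_neg ho]
        rw [List.flatMap_cons, hp, List.nil_append]
        rw [ih cur acc hcur]
        simp only [tokB]
        rw [if_neg hn, if_neg ho]

theorem stepA_eq : (fun (e : List Char) c =>
      if c ∈ "0123456789.".toList then e ++ [c]
      else if c ∈ "+-/*^()".toList then e ++ [' ', c, ' ']
      else e) = fun e c => e ++ pieceA c := by
  funext e c
  simp only [pieceA]
  split_ifs <;> simp

-- ===== VERDICT (by name: the statement is the Claim_ definition above) =====
theorem upgrade_expression_spec : Claim_equal_upgrade_expression := by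
  intro s _
  unfold Spec_upgrade_expression upgrade_expression upgrade_expression_alt
  rw [stepA_eq, PySem.List.foldl_append_eq_flatMap, List.nil_append]
  rw [PySem.Str.split₀]
  simp only [String.toList_ofList]
  rw [show PySem.Chars.split₀ (s.toList.flatMap pieceA)
      = PySem.Chars.split₀.go (s.toList.flatMap pieceA) [] [] from rfl]
  rw [go_eq_tokB s.toList [] [] (by intro x hx; cases hx)]
  simp
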